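-- pv_equiv track=rewrite | github.com/iampso/tpr | milena.py | nwcorner_method
-- ===== SOURCE A (Python) =====
-- a = [60, 65, 70]  # Запасы
--
-- b = [40, 60, 70, 25]  # Потребности
--
-- def nwcorner_method(a, b, C):
--     x = [[0] * len(b) for _ in range(len(a))]  # Матрица перевозок
--
--
--     for i in range(len(a)):  # кол-во производителей
--         for j in range(len(b)):  # кол-во потребителей
--             if a[i] > 0 and b[j] > 0:  # проверка есть ли ещё запас и есть ли потребность
--                 shipment = min(a[i], b[j])  # определяем сколько можем отправить
--                 x[i][j] = shipment  # заполняем кол-во отправл груза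
--                 # уменьшаем запас и потребность на кол-во отправленного груза
--                 a[i] -= shipment
--                 b[j] -= shipment
--     return x
-- ===== SOURCE B (Python) =====
-- def nwcorner_method(a, b, C):
--     # Two-pointer staircase sweep: instead of re-scanning every (i, j) cell,
--     # keep a single column pointer j (with the remaining demand `rem`) that
--     # only moves forward, skipping non-positive demands once.
--     # Unlike A, this does not mutate the caller's a and b lists.
--     n = len(b)
--     x = [[0] * n for _ in range(len(a))]
--     j = 0
--     while j < n and b[j] <= 0:
--         j += 1
--     rem = b[j] if j < n else 0
--     for i in range(len(a)):
--         ai = a[i]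
--         row = x[i]
--         while ai > 0 and rem > 0:
--             s = min(ai, rem)
--             row[j] = s
--             ai -= s
--             rem -= s
--             if rem == 0:
--                 j += 1
--                 while j < n and b[j] <= 0:
--                     j += 1
--                 rem = b[j] if j < n else 0
--     return x
-- ===== Notes on version B (the rewrite author's own statement) =====
-- stated objective: faster
-- what changed: Replaces A's full m*n cell-by-cell scan (re-testing every exhausted row/column) by a two-pointer staircase sweep: a single forward column pointer with the remaining demand, advanced only when a demand is exhausted, so the per-row work after allocation is O(segment) instead of O(n); B also does not mutate the caller's a and b.
import Mathlib
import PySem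

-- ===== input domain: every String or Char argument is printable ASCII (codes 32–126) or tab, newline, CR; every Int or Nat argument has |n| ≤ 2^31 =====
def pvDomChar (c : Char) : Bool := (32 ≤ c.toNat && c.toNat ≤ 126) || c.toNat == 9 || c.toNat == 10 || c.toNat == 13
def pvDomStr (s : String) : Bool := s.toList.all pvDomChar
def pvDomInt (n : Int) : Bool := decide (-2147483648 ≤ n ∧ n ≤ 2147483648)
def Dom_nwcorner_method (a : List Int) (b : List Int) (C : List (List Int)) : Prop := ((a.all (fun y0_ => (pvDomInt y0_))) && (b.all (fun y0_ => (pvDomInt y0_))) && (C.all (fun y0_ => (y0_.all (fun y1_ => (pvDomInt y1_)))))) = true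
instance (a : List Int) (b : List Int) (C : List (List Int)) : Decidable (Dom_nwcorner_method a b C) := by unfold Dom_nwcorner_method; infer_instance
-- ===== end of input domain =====

-- B replaces A's full m*n cell-by-cell scan by a two-pointer staircase sweep (a forward
-- column pointer plus the remaining demand, advanced only on exhaustion); equivalence is
-- about the RETURN value only: Python A mutates its a and b arguments in place, Python B
-- does not.

-- ===== PORT A =====
-- inner loop `for j in range(len(b))` of A for one row: structural recursion over the
-- demand list, threading the remaining supply a[i]; returns (a[i] left, new b, row of x)
def nwRowA (ai : Int) (bs : List Int) : Int × List Int × List Int :=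
  match bs with
  | [] => (ai, [], [])
  | d :: rest =>
      if 0 < ai ∧ 0 < d then
        let r := nwRowA (ai - min ai d) rest
        (r.1, (d - min ai d) :: r.2.1, min ai d :: r.2.2)
      else
        let r := nwRowA ai rest
        (r.1, d :: r.2.1, 0 :: r.2.2)

def nwLoopA : List Int → List Int → List (List Int)
  | [], _ => []
  | ai :: rest, bs =>
      let r := nwRowA ai bs
      r.2.2 :: nwLoopA rest r.2.1

def nwcorner_method (a : List Int) (b : List Int) (C : List (List Int)) : List (List Int) :=
  nwLoopA a b

-- ===== PORT B =====
-- `while j < n and b[j] <= 0: j += 1` / `rem = b[j] if j < n else 0` /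
-- `while ai > 0 and rem > 0` with s = min(ai, rem) written inline / `for i in range(len(a))`
def skipNeg (b : List Int) (j : Nat) : Nat :=
  if _h : j < b.length ∧ b.getD j 0 ≤ 0 then skipNeg b (j + 1) else j
termination_by b.length - j
decreasing_by omega

def remAt (b : List Int) (j : Nat) : Int :=
  if j < b.length then b.getD j 0 else 0

def fillB (b : List Int) (row : List Int) (ai : Int) (j : Nat) (rem : Int) :
    List Int × Nat × Int :=
  if 0 < ai ∧ 0 < rem then
    if rem - min ai rem = 0 then
      fillB b (row.set j (min ai rem)) (ai - min ai rem) (skipNeg b (j + 1))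
        (remAt b (skipNeg b (j + 1)))
    else
      fillB b (row.set j (min ai rem)) (ai - min ai rem) j (rem - min ai rem)
  else (row, j, rem)
termination_by ai.toNat
decreasing_by all_goals omega

def fillRowsB (b : List Int) : List Int → Nat → Int → List (List Int)
  | [], _, _ => []
  | ai :: rest, j, rem =>
      let r := fillB b (List.replicate b.length 0) ai j rem
      r.1 :: fillRowsB b rest r.2.1 r.2.2

def nwcorner_method_alt (a : List Int) (b : List Int) (C : List (List Int)) : List (List Int) :=
  fillRowsB b a (skipNeg b 0) (remAt b (skipNeg b 0))

-- ===== PRECONDITION & SPEC =====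
def Spec_nwcorner_method (a : List Int) (b : List Int) (C : List (List Int)) (out : List (List Int)) : Prop := out = nwcorner_method_alt a b C
instance (a : List Int) (b : List Int) (C : List (List Int)) (out : List (List Int)) : Decidable (Spec_nwcorner_method a b C out) := by unfold Spec_nwcorner_method; infer_instance

-- ===== CLAIM (what is proved, stated in full; the proofs are below) =====
def Claim_equal_nwcorner_method : Prop := ∀ (a : List Int) (b : List Int) (C : List (List Int)), Dom_nwcorner_method a b C → Spec_nwcorner_method a b C (nwcorner_method a b C)

-- ===== LEMMAS AND PROOFS =====

-- the loop invariant: how A's current demand list b' is encoded by B's (pointer, remaining)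
def InvNW (b b' : List Int) (j : Nat) (rem : Int) : Prop :=
  ∃ pre : List Int, pre.length = j ∧ (∀ d ∈ pre, d ≤ 0) ∧
    ((j < b.length ∧ 0 < rem ∧ b' = pre ++ rem :: b.drop (j + 1)) ∨
     (j = b.length ∧ rem = 0 ∧ b' = pre))

theorem skipNeg_ge (b : List Int) (j : Nat) : j ≤ skipNeg b j := by
  fun_induction skipNeg b j with
  | case1 j h ih => omega
  | case2 j h => omega

theorem skipNeg_le_len (b : List Int) (j : Nat) (h : j ≤ b.length) : skipNeg b j ≤ b.length := by
  fun_induction skipNeg b j with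
  | case1 j h' ih => exact ih (by omega)
  | case2 j h' => omega

theorem skipNeg_prefix (b : List Int) (j k : Nat) (h1 : j ≤ k) (h2 : k < skipNeg b j) :
    b.getD k 0 ≤ 0 := by
  fun_induction skipNeg b j with
  | case1 j h ih =>
      rcases Nat.eq_or_lt_of_le h1 with rfl | hlt
      · exact h.2
      · exact ih hlt h2
  | case2 j h => omega

theorem skipNeg_pos (b : List Int) (j : Nat) (h : skipNeg b j < b.length) :
    0 < b.getD (skipNeg b j) 0 := by
  fun_induction skipNeg b j with
  | case1 j h' ih => exact ih h
  | case2 j h' =>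
      simp only [not_and, not_le] at h'
      exact h' h

theorem take_skip_nonpos (b : List Int) (j0 : Nat) (hle : j0 ≤ skipNeg b 0) :
    ∀ d ∈ b.take j0, d ≤ 0 := by
  intro d hd
  obtain ⟨k, hk, rfl⟩ := List.getElem_of_mem hd
  simp only [List.length_take, lt_min_iff] at hk
  rw [List.getElem_take]
  have := skipNeg_prefix b 0 k (Nat.zero_le k) (by omega)
  rwa [List.getD_eq_getElem _ _ hk.2] at this

theorem invNW_init (b : List Int) : InvNW b b (skipNeg b 0) (remAt b (skipNeg b 0)) := by
  have hle : skipNeg b 0 ≤ b.length := skipNeg_le_len b 0 (Nat.zero_le _)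
  refine ⟨b.take (skipNeg b 0), by simp [List.length_take]; omega,
    take_skip_nonpos b _ le_rfl, ?_⟩
  by_cases h : skipNeg b 0 < b.length
  · left
    refine ⟨h, ?_, ?_⟩
    · simpa [remAt, h] using skipNeg_pos b 0 h
    · rw [remAt, if_pos h, List.getD_eq_getElem _ _ h]
      conv_lhs => rw [← List.take_append_drop (skipNeg b 0) b]
      rw [List.drop_eq_getElem_cons h]
  · right
    have hj : skipNeg b 0 = b.length := by omega
    refine ⟨hj, by simp [remAt, h], ?_⟩
    rw [hj, List.take_length]

theorem getD_replicate_zero (n m : Nat) : (List.replicate n (0:Int)).getD m 0 = 0 := by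
  simp only [List.getD_eq_getElem?_getD, List.getElem?_replicate]
  split <;> simp

theorem getD_set_eq (l : List Int) (j k : Nat) (v : Int) :
    (l.set j v).getD k 0 = if k = j ∧ j < l.length then v else l.getD k 0 := by
  simp only [List.getD_eq_getElem?_getD, List.getElem?_set]
  by_cases h1 : j = k
  · subst h1
    by_cases h2 : j < l.length
    · simp [h2]
    · have : l[j]? = none := List.getElem?_eq_none_iff.mpr (by omega)
      simp [h2]
  · have hne : ¬ (k = j ∧ j < l.length) := fun hh => h1 hh.1.symm
    simp [h1, hne]

theorem nwRowA_nonpos_supply (bs : List Int) (ai : Int) (h : ai ≤ 0) :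
    nwRowA ai bs = (ai, bs, List.replicate bs.length 0) := by
  induction bs with
  | nil => simp [nwRowA]
  | cons d rest ih =>
      rw [nwRowA, if_neg (by omega), ih]
      simp [List.replicate_succ]

theorem nwRowA_strip (pre : List Int) (hpre : ∀ d ∈ pre, d ≤ 0) (ai : Int) (suf : List Int) :
    nwRowA ai (pre ++ suf) =
      ((nwRowA ai suf).1, pre ++ (nwRowA ai suf).2.1,
        List.replicate pre.length 0 ++ (nwRowA ai suf).2.2) := by
  induction pre with
  | nil => simp
  | cons d rest ih =>
      have hd : d ≤ 0 := hpre d (by simp)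
      rw [List.cons_append, nwRowA, if_neg (by have := hd; omega),
        ih (fun x hx => hpre x (by simp [hx]))]
      simp [List.replicate_succ]

theorem nwRowA_nonneg (bs : List Int) (ai : Int) :
    ∀ v ∈ (nwRowA ai bs).2.2, 0 ≤ v := by
  induction bs generalizing ai with
  | nil => simp [nwRowA]
  | cons d rest ih =>
      rw [nwRowA]
      split
      · rename_i h
        intro v hv
        rcases List.mem_cons.mp hv with rfl | hv
        · omega
        · exact ih _ v hv
      · intro v hv
        rcases List.mem_cons.mp hv with rfl | hv
        · exact le_refl 0
        · exact ih _ v hv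

theorem nwRowA_row_length (bs : List Int) (ai : Int) :
    (nwRowA ai bs).2.2.length = bs.length := by
  induction bs generalizing ai with
  | nil => simp [nwRowA]
  | cons d rest ih => rw [nwRowA]; split <;> simp [ih]

theorem nwRowA_cons (ai d : Int) (rest : List Int) :
    nwRowA ai (d :: rest) =
      if 0 < ai ∧ 0 < d then
        ((nwRowA (ai - min ai d) rest).1,
         (d - min ai d) :: (nwRowA (ai - min ai d) rest).2.1,
         min ai d :: (nwRowA (ai - min ai d) rest).2.2)
      else
        ((nwRowA ai rest).1, d :: (nwRowA ai rest).2.1, 0 :: (nwRowA ai rest).2.2) := by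
  rw [nwRowA]

theorem fillB_length (b row : List Int) (ai : Int) (j : Nat) (rem : Int) :
    (fillB b row ai j rem).1.length = row.length := by
  fun_induction fillB b row ai j rem with
  | case1 row ai j rem h h2 ih => simpa using ih
  | case2 row ai j rem h h2 ih => simpa using ih
  | case3 row ai j rem h => rfl

theorem core_stop (b row0 b' : List Int) (ai : Int) (j : Nat) (rem : Int)
    (hInv : InvNW b b' j rem) (hg : ¬ (0 < ai ∧ 0 < rem)) :
    (∀ k : Nat, (fillB b row0 ai j rem).1.getD k 0 =
        if 0 < (nwRowA ai b').2.2.getD k 0 then (nwRowA ai b').2.2.getD k 0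
        else row0.getD k 0)
    ∧ InvNW b (nwRowA ai b').2.1 (fillB b row0 ai j rem).2.1 (fillB b row0 ai j rem).2.2 := by
  rw [fillB, if_neg hg]
  by_cases hai : ai ≤ 0
  · rw [nwRowA_nonpos_supply _ _ hai]
    exact ⟨fun k => by simp, hInv⟩
  · obtain ⟨pre, hl, hpre, hcase⟩ := hInv
    have hrem : ¬ 0 < rem := fun h => hg ⟨by omega, h⟩
    rcases hcase with ⟨_, hr, _⟩ | ⟨hj, hr, hb⟩
    · omega
    · subst hb
      rw [show b' = b' ++ ([] : List Int) by simp, nwRowA_strip b' hpre, nwRowA]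
      refine ⟨fun k => by simp, ?_⟩
      exact ⟨b', hl, hpre, Or.inr ⟨hj, hr, by simp⟩⟩

theorem invNW_advance (b pre : List Int) (j : Nat) (hl : pre.length = j)
    (hpre : ∀ d ∈ pre, d ≤ 0) (hjlt : j < b.length) :
    InvNW b (pre ++ 0 :: b.drop (j + 1)) (skipNeg b (j + 1)) (remAt b (skipNeg b (j + 1))) := by
  have h1 : j + 1 ≤ skipNeg b (j + 1) := skipNeg_ge b (j + 1)
  have h2 : skipNeg b (j + 1) ≤ b.length := skipNeg_le_len b (j + 1) (by omega)
  refine ⟨pre ++ 0 :: (b.drop (j + 1)).take (skipNeg b (j + 1) - (j + 1)), ?_, ?_, ?_⟩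
  · simp [List.length_take, List.length_drop, hl]; omega
  · intro d hd
    rcases List.mem_append.mp hd with hd | hd
    · exact hpre d hd
    · rcases List.mem_cons.mp hd with rfl | hd
      · exact le_refl 0
      · obtain ⟨t, ht, rfl⟩ := List.getElem_of_mem hd
        have ht' := ht
        simp only [List.length_take, List.length_drop, lt_min_iff] at ht'
        rw [List.getElem_take, List.getElem_drop]
        have := skipNeg_prefix b (j + 1) (j + 1 + t) (by omega) (by omega)
        rwa [List.getD_eq_getElem _ _ (by omega)] at this
  · by_cases hj' : skipNeg b (j + 1) < b.length
    · left
      refine ⟨hj', by simpa [remAt, hj'] using skipNeg_pos b (j + 1) hj', ?_⟩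
      conv_lhs => rw [← List.take_append_drop (skipNeg b (j + 1) - (j + 1)) (b.drop (j + 1))]
      rw [List.drop_drop, show j + 1 + (skipNeg b (j + 1) - (j + 1)) = skipNeg b (j + 1) by omega,
        List.drop_eq_getElem_cons hj', remAt, if_pos hj', List.getD_eq_getElem _ _ hj']
      simp
    · right
      have hj : skipNeg b (j + 1) = b.length := by omega
      refine ⟨hj, by simp [remAt, hj'], ?_⟩
      rw [List.take_of_length_le (by simp [List.length_drop]; omega)]

theorem core (b : List Int) : ∀ (N : Nat) (ai : Int), ai.toNat ≤ N →
    ∀ (row0 b' : List Int) (j : Nat) (rem : Int), InvNW b b' j rem → row0.length = b.length →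
    (∀ k : Nat, (fillB b row0 ai j rem).1.getD k 0 =
        if 0 < (nwRowA ai b').2.2.getD k 0 then (nwRowA ai b').2.2.getD k 0
        else row0.getD k 0)
    ∧ InvNW b (nwRowA ai b').2.1 (fillB b row0 ai j rem).2.1 (fillB b row0 ai j rem).2.2 := by
  intro N
  induction N with
  | zero =>
      intro ai hN row0 b' j rem hInv hlen
      exact core_stop b row0 b' ai j rem hInv (by omega)
  | succ N IH =>
      intro ai hN row0 b' j rem hInv hlen
      by_cases hg : 0 < ai ∧ 0 < rem
      · obtain ⟨pre, hl, hpre, hcase⟩ := hInv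
        rcases hcase with ⟨hjlt, hrpos, hb⟩ | ⟨_, hr0, _⟩
        · subst hb
          have hs1 : 0 < min ai rem := by omega
          have hstep : nwRowA ai (pre ++ rem :: b.drop (j + 1)) =
              ((nwRowA (ai - min ai rem) (b.drop (j + 1))).1,
               pre ++ (rem - min ai rem) :: (nwRowA (ai - min ai rem) (b.drop (j + 1))).2.1,
               List.replicate j 0 ++ min ai rem :: (nwRowA (ai - min ai rem) (b.drop (j + 1))).2.2) := by
            rw [nwRowA_strip pre hpre, nwRowA_cons, if_pos ⟨hg.1, hrpos⟩, hl]
          rw [hstep, fillB, if_pos hg]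
          by_cases hz : rem - min ai rem = 0
          · rw [if_pos hz]
            have hrec := IH (ai - min ai rem) (by omega) (row0.set j (min ai rem))
              (pre ++ 0 :: b.drop (j + 1)) (skipNeg b (j + 1)) (remAt b (skipNeg b (j + 1)))
              (invNW_advance b pre j hl hpre hjlt) (by simp [List.length_set, hlen])
            rw [show pre ++ (0:Int) :: b.drop (j + 1) = (pre ++ [(0:Int)]) ++ b.drop (j + 1) by simp] at hrec
            rw [nwRowA_strip (pre ++ [0])
              (by intro d hd; rcases List.mem_append.mp hd with hd | hd
                  · exact hpre d hd
                  · simp at hd; omega),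
              show (pre ++ [(0:Int)]).length = j + 1 by simp [hl]] at hrec
            dsimp only at hrec
            refine ⟨?_, ?_⟩
            · intro k
              rw [hrec.1 k]
              rcases Nat.lt_trichotomy k j with hk | rfl | hk
              · rw [List.getD_append _ _ _ _ (by simp; omega),
                  List.getD_append _ _ _ _ (by simp; omega),
                  List.getD_replicate _ (by omega), List.getD_replicate _ (by omega),
                  getD_set_eq]
                have hne : ¬ (k = j ∧ j < row0.length) := by omega
                simp [hne]
              · rw [List.getD_append _ _ _ _ (by simp), List.getD_replicate _ (by omega),
                  getD_set_eq, List.getD_append_right _ _ _ _ (by simp)]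
                have hp : k = k ∧ k < row0.length := ⟨rfl, by omega⟩
                simp [hp, hs1]
              · rw [List.getD_append_right _ _ _ _ (by simp; omega),
                  List.getD_append_right _ _ _ _ (by simp; omega),
                  getD_set_eq]
                have hne : ¬ (k = j ∧ j < row0.length) := by omega
                simp only [List.length_replicate, hne, if_false]
                rw [show k - j = (k - j - 1) + 1 by omega, List.getD_cons_succ,
                  show k - (j + 1) = k - j - 1 by omega]
            · have := hrec.2
              rw [hz]
              simpa using this
          · rw [if_neg hz]
            have hz' : 0 < rem - min ai rem := by omega
            have hai0 : ai - min ai rem = 0 := by omega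
            have hInv2 : InvNW b (pre ++ (rem - min ai rem) :: b.drop (j + 1)) j
                (rem - min ai rem) := ⟨pre, hl, hpre, Or.inl ⟨hjlt, hz', rfl⟩⟩
            have hrec := IH (ai - min ai rem) (by omega) (row0.set j (min ai rem)) _ j
              (rem - min ai rem) hInv2 (by simp [hlen])
            rw [hai0, nwRowA_nonpos_supply _ _ le_rfl] at hrec
            dsimp only at hrec
            rw [hai0, nwRowA_nonpos_supply _ _ le_rfl]
            dsimp only
            refine ⟨?_, ?_⟩
            · intro k
              rw [hrec.1 k, getD_replicate_zero, if_neg (lt_irrefl 0), getD_set_eq]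
              rcases Nat.lt_trichotomy k j with hk | rfl | hk
              · rw [List.getD_append _ _ _ _ (by simp; omega),
                  List.getD_replicate _ (by omega)]
                have hne : ¬ (k = j ∧ j < row0.length) := by omega
                simp [hne]
              · rw [List.getD_append_right _ _ _ _ (by simp)]
                have hp : k = k ∧ k < row0.length := ⟨rfl, by omega⟩
                simp [hp, hs1]
              · rw [List.getD_append_right _ _ _ _ (by simp; omega)]
                have hne : ¬ (k = j ∧ j < row0.length) := by omega
                simp only [List.length_replicate, hne, if_false]
                rw [show k - j = (k - j - 1) + 1 by omega, List.getD_cons_succ,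
                  getD_replicate_zero]
                simp
            · exact hrec.2
        · omega
      · exact core_stop b row0 b' ai j rem hInv hg

theorem invNW_len (b b' : List Int) (j : Nat) (rem : Int) (h : InvNW b b' j rem) :
    b'.length = b.length := by
  obtain ⟨pre, hl, _, hc⟩ := h
  rcases hc with ⟨hj, _, rfl⟩ | ⟨hj, _, rfl⟩ <;> simp [List.length_drop, hl] <;> omega

theorem loops_eq (b : List Int) : ∀ (as b' : List Int) (j : Nat) (rem : Int),
    InvNW b b' j rem → nwLoopA as b' = fillRowsB b as j rem := by
  intro as
  induction as with
  | nil => intro b' j rem _; rfl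
  | cons ai rest ih =>
      intro b' j rem hInv
      have hcore := core b ai.toNat ai le_rfl (List.replicate b.length 0) b' j rem hInv
        (by simp)
      rw [nwLoopA, fillRowsB]
      have hrow : (nwRowA ai b').2.2 =
          (fillB b (List.replicate b.length 0) ai j rem).1 := by
        apply List.ext_getElem
        · rw [nwRowA_row_length, fillB_length, invNW_len b b' j rem hInv, List.length_replicate]
        · intro k h1 h2
          have hk := hcore.1 k
          rw [getD_replicate_zero] at hk
          rw [← List.getD_eq_getElem _ 0 h1, ← List.getD_eq_getElem _ 0 h2, hk]
          by_cases hpos : 0 < (nwRowA ai b').2.2.getD k 0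
          · rw [if_pos hpos]
          · rw [if_neg hpos]
            have hv : (nwRowA ai b').2.2.getD k 0 = (nwRowA ai b').2.2[k] :=
              List.getD_eq_getElem _ _ h1
            have hnn := nwRowA_nonneg b' ai _ (List.getElem_mem h1)
            omega
      rw [hrow, ih _ _ _ hcore.2]

-- ===== VERDICT (by name: the statement is the Claim_ definition above) =====
theorem nwcorner_method_spec : Claim_equal_nwcorner_method := by
  intro a b C _
  unfold Spec_nwcorner_method nwcorner_method nwcorner_method_alt
  exact loops_eq b a b _ _ (invNW_init b)
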